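-- pv_equiv track=rewrite | github.com/c-hydro/hmc | hmc/generic_toolkit/namelist/lib_namelist_utils.py | group_settings
-- ===== SOURCE A (Python) =====
-- from typing import Tuple, List
--
-- def group_settings(settings_blocks: List[str]) -> dict:
--     """
--     Group settings.
--     :param settings_lines:
--     :param group_re:
--     :return: group_blocks
--     """
--
--     settings_groups = {}
--     for settings_block in settings_blocks:
--         settings_lines_raw = settings_block.split('\n')
--
--         settings_block_name = settings_lines_raw.pop(0).strip()
--         settings_groups[settings_block_name] = {}
--
--         settings_lines_filtered = []
--         for line in settings_lines_raw:
--             # cleanup string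
--             line = line.strip()
--             if line == "":
--                 continue
--             if line.startswith('!'):
--                 continue
--
--             try:
--                 k, v = line.split('=')
--                 settings_lines_filtered.append(line)
--             except ValueError:
--                 # no = in current line, try to append to previous line
--                 if settings_lines_filtered[-1].endswith(','):
--                     settings_lines_filtered[-1] += line
--                 else:
--                     raise
--
--         for line in settings_lines_filtered:
--             # commas at the end of lines seem to be optional
--             if line.endswith(','):
--                 line = line[:-1]
--
--             # inline comments are allowed, but we remove them for now
--             if "!" in line:
--                 line = line.split("!")[0].strip()
--
--             k, v = line.split('=')
--             variable_name = k.strip()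
--             variable_value = v.strip()
--
--             settings_groups[settings_block_name][variable_name] = variable_value
--
--     return settings_groups
-- ===== SOURCE B (Python) =====
-- from typing import List
--
--
-- def _assign(entries: dict, line: str) -> None:
--     # finalize one logical line: optional trailing comma, optional inline comment
--     if line.endswith(','):
--         line = line[:-1]
--     if "!" in line:
--         line = line.split("!")[0].strip()
--     k, v = line.split('=')
--     entries[k.strip()] = v.strip()
--
--
-- def group_settings(settings_blocks: List[str]) -> dict:
--     settings_groups = {}
--     for settings_block in settings_blocks:
--         lines = settings_block.split('\n')
--         entries = {}
--         settings_groups[lines[0].strip()] = entries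
--         pending = None
--         for raw in lines[1:]:
--             line = raw.strip()
--             if line == "" or line.startswith('!'):
--                 continue
--             if len(line.split('=')) == 2:
--                 if pending is not None:
--                     _assign(entries, pending)
--                 pending = line
--             elif pending is not None and pending.endswith(','):
--                 pending += line
--             else:
--                 raise ValueError("cannot parse line: %r" % line)
--         if pending is not None:
--             _assign(entries, pending)
--     return settings_groups
-- ===== Notes on version B (the rewrite author's own statement) =====
-- stated objective: simpler
-- what changed: A builds a filtered list of logical lines per block (merging continuation lines into the list's last element) and then re-processes that list in a second loop; B makes a single pass over each block's lines carrying one pending logical line and assigns each completed key/value into the block's dict directly, with a shared _assign helper.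
import Mathlib
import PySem

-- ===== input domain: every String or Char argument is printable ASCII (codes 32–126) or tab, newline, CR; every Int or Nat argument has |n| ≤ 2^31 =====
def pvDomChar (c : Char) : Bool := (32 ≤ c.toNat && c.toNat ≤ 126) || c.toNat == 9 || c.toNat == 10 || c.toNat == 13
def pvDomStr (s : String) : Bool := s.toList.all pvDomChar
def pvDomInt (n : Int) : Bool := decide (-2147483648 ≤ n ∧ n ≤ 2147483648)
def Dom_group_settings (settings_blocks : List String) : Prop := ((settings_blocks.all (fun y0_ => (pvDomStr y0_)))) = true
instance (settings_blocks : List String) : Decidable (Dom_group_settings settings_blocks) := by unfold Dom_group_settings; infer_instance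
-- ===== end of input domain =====

-- B replaces A's build-filtered-list-then-reprocess with a single pass per block keeping one
-- pending logical line (objective: simpler). In both ports an exception (IndexError/ValueError)
-- is modeled as Option `none`, propagated with Option.bind and excluded by Pre_; Python's in-place
-- mutation of the nested dict is modeled by building the inner dict and inserting it once
-- (unobservable in the return value).

-- s.split(sep) for a NONEMPTY literal sep (PySem.Str.split? is `some` there; exact)
def pvSplit (s sep : String) : List String := (PySem.Str.split? s sep).getD []

-- ===== PORT A =====
-- A's first loop: try k, v = line.split('='): append; except ValueError: merge into
-- settings_lines_filtered[-1] (IndexError when it is empty, re-raise when no trailing comma)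
def pvPass1A (acc : List String) : List String → Option (List String)
  | [] => some acc
  | l :: ls =>
      let t := PySem.Str.strip l
      if t = "" then pvPass1A acc ls
      else if PySem.Str.startswith t "!" then pvPass1A acc ls
      else if (pvSplit t "=").length = 2 then pvPass1A (acc ++ [t]) ls
      else
        match acc.getLast? with
        | none => none                                   -- settings_lines_filtered[-1]: IndexError
        | some last =>
            if PySem.Str.endswith last "," then pvPass1A (acc.dropLast ++ [last ++ t]) ls
            else none                                     -- raise (re-raise the ValueError)

-- body of A's second loop for one filtered line (none = ValueError from `k, v = line.split('=')`)
def pvAssignA (d : PySem.Dict String String) (line : String) : Option (PySem.Dict String String) :=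
  let line1 := if PySem.Str.endswith line "," then PySem.Str.slice line none (some (-1)) else line
  let line2 := if PySem.Str.isIn "!" line1 then PySem.Str.strip ((pvSplit line1 "!").headD "") else line1
  match pvSplit line2 "=" with
  | [k, v] => some (d.insert (PySem.Str.strip k) (PySem.Str.strip v))
  | _ => none

-- A's second loop over the filtered lines
def pvPass2A (d : PySem.Dict String String) : List String → Option (PySem.Dict String String)
  | [] => some d
  | l :: ls => (pvAssignA d l).bind (fun d' => pvPass2A d' ls)

-- one iteration of A's outer loop: pop the block name, filter, then fill the block's dict
def pvBlockA (g : PySem.Dict String (PySem.Dict String String)) (b : String) :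
    Option (PySem.Dict String (PySem.Dict String String)) :=
  (pvPass1A [] (pvSplit b "\n").tail).bind (fun filt =>
    (pvPass2A PySem.Dict.empty filt).bind (fun e =>
      some (g.insert (PySem.Str.strip ((pvSplit b "\n").headD "")) e)))

def pvRunA (g : PySem.Dict String (PySem.Dict String String)) :
    List String → Option (PySem.Dict String (PySem.Dict String String))
  | [] => some g
  | b :: bs => (pvBlockA g b).bind (fun g' => pvRunA g' bs)

def group_settings (settings_blocks : List String) : List (String × List (String × String)) :=
  match pvRunA PySem.Dict.empty settings_blocks with
  | some g => g.items.map (fun p => (p.1, p.2.items))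
  | none => []                                            -- Python raises here; outside Pre_

-- ===== PORT B =====
-- Source B's _assign helper (none = ValueError from `k, v = line.split('=')`)
def pvAssignB (e : PySem.Dict String String) (line : String) : Option (PySem.Dict String String) :=
  let line1 := if PySem.Str.endswith line "," then PySem.Str.slice line none (some (-1)) else line
  let line2 := if PySem.Str.isIn "!" line1 then PySem.Str.strip ((pvSplit line1 "!").headD "") else line1
  match pvSplit line2 "=" with
  | [k, v] => some (e.insert (PySem.Str.strip k) (PySem.Str.strip v))
  | _ => none

-- Source B's single pass: state = (entries so far, pending logical line); flush pending at block end
def pvLoopB (e : PySem.Dict String String) (pending : Option String) :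
    List String → Option (PySem.Dict String String)
  | [] =>
      match pending with
      | none => some e
      | some p => pvAssignB e p
  | raw :: rest =>
      let line := PySem.Str.strip raw
      if line = "" ∨ PySem.Str.startswith line "!" = true then pvLoopB e pending rest
      else if (pvSplit line "=").length = 2 then
        match pending with
        | none => pvLoopB e (some line) rest
        | some p => (pvAssignB e p).bind (fun e' => pvLoopB e' (some line) rest)
      else
        match pending with
        | some p => if PySem.Str.endswith p "," then pvLoopB e (some (p ++ line)) rest else none
        | none => none                                    -- raise ValueError

def pvBlockB (g : PySem.Dict String (PySem.Dict String String)) (b : String) :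
    Option (PySem.Dict String (PySem.Dict String String)) :=
  (pvLoopB PySem.Dict.empty none (pvSplit b "\n").tail).bind (fun e =>
    some (g.insert (PySem.Str.strip ((pvSplit b "\n").headD "")) e))

def pvRunB (g : PySem.Dict String (PySem.Dict String String)) :
    List String → Option (PySem.Dict String (PySem.Dict String String))
  | [] => some g
  | b :: bs => (pvBlockB g b).bind (fun g' => pvRunB g' bs)

def group_settings_alt (settings_blocks : List String) : List (String × List (String × String)) :=
  match pvRunB PySem.Dict.empty settings_blocks with
  | some g => g.items.map (fun p => (p.1, p.2.items))
  | none => []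

-- ===== PRECONDITION & SPEC =====
-- helpers for Pre_ (independent of both ports): the stripped, non-blank, non-comment lines of a
-- block's tail; the logical lines after merging continuations; the trailing-comma/-comment cleanup
def pvCleanLines (b : String) : List String :=
  ((pvSplit b "\n").tail).filterMap (fun l =>
    let t := PySem.Str.strip l
    if t = "" ∨ PySem.Str.startswith t "!" = true then none else some t)

def pvMergeLines (ts : List String) : List String :=
  ts.foldl (fun acc t =>
    if (pvSplit t "=").length = 2 then acc ++ [t]
    else
      match acc.getLast? with
      | none => acc
      | some last => acc.dropLast ++ [last ++ t]) []

def pvFinalize (m : String) : String :=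
  let m1 := if PySem.Str.endswith m "," then PySem.Str.slice m none (some (-1)) else m
  if PySem.Str.isIn "!" m1 then PySem.Str.strip ((pvSplit m1 "!").headD "") else m1

-- Pre_ excludes exactly the inputs where A raises: a block whose first clean line is a continuation
-- (no '='-split into two: IndexError), a continuation after a line not ending in ',' (re-raised
-- ValueError), or a merged logical line not reduced to exactly one '=' by the cleanup (ValueError).
def Pre_group_settings (settings_blocks : List String) : Prop :=
  ∀ b ∈ settings_blocks,
    (pvCleanLines b ≠ [] → (pvSplit ((pvCleanLines b).headD "") "=").length = 2) ∧
    (∀ pc ∈ (pvCleanLines b).zip (pvCleanLines b).tail,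
        (pvSplit pc.2 "=").length ≠ 2 → PySem.Str.endswith pc.1 "," = true) ∧
    (∀ m ∈ pvMergeLines (pvCleanLines b), (pvSplit (pvFinalize m) "=").length = 2)

instance (settings_blocks : List String) : Decidable (Pre_group_settings settings_blocks) := by
  unfold Pre_group_settings; infer_instance

def pvWitness_group_settings : List String :=
  ["sec\na = 1,\n 2\n! note\nb = 3 ! x"]

def Spec_group_settings (settings_blocks : List String) (out : List (String × List (String × String))) : Prop := out = group_settings_alt settings_blocks
instance (settings_blocks : List String) (out : List (String × List (String × String))) : Decidable (Spec_group_settings settings_blocks out) := by unfold Spec_group_settings; infer_instance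

-- ===== CLAIM (what is proved, stated in full; the proofs are below) =====
def Claim_equal_group_settings : Prop := ∀ (settings_blocks : List String), Dom_group_settings settings_blocks → Pre_group_settings settings_blocks → Spec_group_settings settings_blocks (group_settings settings_blocks)

-- ===== LEMMAS AND PROOFS =====

theorem pvAssignB_eq (e : PySem.Dict String String) (l : String) : pvAssignB e l = pvAssignA e l := rfl

-- A's first pass on clean (pre-stripped, pre-filtered) lines
def pvPass1A' (acc : List String) : List String → Option (List String)
  | [] => some acc
  | t :: ts =>
      if (pvSplit t "=").length = 2 then pvPass1A' (acc ++ [t]) ts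
      else
        match acc.getLast? with
        | none => none
        | some last =>
            if PySem.Str.endswith last "," then pvPass1A' (acc.dropLast ++ [last ++ t]) ts
            else none

-- B's loop on clean lines
def pvLoopB' (e : PySem.Dict String String) (pending : Option String) :
    List String → Option (PySem.Dict String String)
  | [] =>
      match pending with
      | none => some e
      | some p => pvAssignB e p
  | t :: ts =>
      if (pvSplit t "=").length = 2 then
        match pending with
        | none => pvLoopB' e (some t) ts
        | some p => (pvAssignB e p).bind (fun e' => pvLoopB' e' (some t) ts)
      else
        match pending with
        | some p => if PySem.Str.endswith p "," then pvLoopB' e (some (p ++ t)) ts else none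
        | none => none

def pvCleanF (l : String) : Option String :=
  let t := PySem.Str.strip l
  if t = "" ∨ PySem.Str.startswith t "!" = true then none else some t

theorem pvPass1A_clean (ls : List String) :
    ∀ acc, pvPass1A acc ls = pvPass1A' acc (ls.filterMap pvCleanF) := by
  induction ls with
  | nil => intro acc; rfl
  | cons l ls ih =>
      intro acc
      simp only [pvPass1A, List.filterMap_cons]
      by_cases h0 : PySem.Str.strip l = ""
      · rw [if_pos h0, show pvCleanF l = none from by
          simp only [pvCleanF]; rw [if_pos (Or.inl h0)]]
        exact ih acc
      · by_cases h1 : PySem.Str.startswith (PySem.Str.strip l) "!" = true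
        · rw [if_neg h0, if_pos h1, show pvCleanF l = none from by
            simp only [pvCleanF]; rw [if_pos (Or.inr h1)]]
          exact ih acc
        · rw [if_neg h0, if_neg h1, show pvCleanF l = some (PySem.Str.strip l) from by
            simp only [pvCleanF]; rw [if_neg (not_or.mpr ⟨h0, h1⟩)]]
          simp only [pvPass1A']
          by_cases h2 : (pvSplit (PySem.Str.strip l) "=").length = 2
          · rw [if_pos h2, if_pos h2]; exact ih _
          · rw [if_neg h2, if_neg h2]
            cases acc.getLast? with
            | none => rfl
            | some last =>
                by_cases h3 : PySem.Str.endswith last "," = true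
                · simp only [if_pos h3]; exact ih _
                · simp only [if_neg h3]

theorem pvLoopB_clean (ls : List String) :
    ∀ e pending, pvLoopB e pending ls = pvLoopB' e pending (ls.filterMap pvCleanF) := by
  induction ls with
  | nil => intro e pending; rfl
  | cons l ls ih =>
      intro e pending
      simp only [pvLoopB, List.filterMap_cons]
      by_cases h0 : PySem.Str.strip l = "" ∨ PySem.Str.startswith (PySem.Str.strip l) "!" = true
      · rw [if_pos h0, show pvCleanF l = none from by
          simp only [pvCleanF]; rw [if_pos h0]]
        exact ih e pending
      · rw [if_neg h0, show pvCleanF l = some (PySem.Str.strip l) from by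
          simp only [pvCleanF]; rw [if_neg h0]]
        simp only [pvLoopB']
        by_cases h2 : (pvSplit (PySem.Str.strip l) "=").length = 2
        · rw [if_pos h2, if_pos h2]
          cases pending with
          | none => exact ih _ _
          | some p => exact Option.bind_congr (fun e' _ => ih _ _)
        · rw [if_neg h2, if_neg h2]
          cases pending with
          | none => rfl
          | some p =>
              by_cases h3 : PySem.Str.endswith p "," = true
              · simp only [if_pos h3]; exact ih _ _
              · simp only [if_neg h3]

theorem pvPass2A_append (acc : List String) (p : String) :
    ∀ d, pvPass2A d (acc ++ [p]) = (pvPass2A d acc).bind (fun d' => pvAssignA d' p) := by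
  induction acc with
  | nil =>
      intro d
      simp only [List.nil_append, pvPass2A, Option.bind_some]
      cases pvAssignA d p with
      | none => rfl
      | some d' => rfl
  | cons l acc ih =>
      intro d
      simp only [List.cons_append, pvPass2A, Option.bind_assoc]
      exact Option.bind_congr (fun d' _ => ih d')

-- the pivotal invariant: B's one-pass loop carrying the open logical line p equals finishing A's
-- first pass from accumulator (acc ++ [p]) and replaying A's second pass over the filtered lines
theorem pvCore (ts : List String) :
    ∀ acc d p, (pvPass1A' (acc ++ [p]) ts).bind (pvPass2A d)
      = (pvPass2A d acc).bind (fun d' => pvLoopB' d' (some p) ts) := by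
  induction ts with
  | nil =>
      intro acc d p
      simp only [pvPass1A', Option.bind_some, pvLoopB']
      rw [pvPass2A_append]
      exact Option.bind_congr (fun a _ => (pvAssignB_eq a p).symm)
  | cons t ts ih =>
      intro acc d p
      simp only [pvPass1A', pvLoopB']
      by_cases h2 : (pvSplit t "=").length = 2
      · rw [if_pos h2]
        simp only [if_pos h2]
        rw [ih (acc ++ [p]) d t, pvPass2A_append, Option.bind_assoc]
        exact Option.bind_congr (fun d' _ => rfl)
      · rw [if_neg h2]
        simp only [if_neg h2]
        rw [List.getLast?_concat]
        by_cases h3 : PySem.Str.endswith p "," = true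
        · simp only [if_pos h3]
          rw [List.dropLast_concat]
          exact ih acc d (p ++ t)
        · simp only [if_neg h3, Option.bind_none]
          cases pvPass2A d acc with
          | none => rfl
          | some d' => rfl

theorem pvTop (ts : List String) (d : PySem.Dict String String) :
    (pvPass1A' [] ts).bind (pvPass2A d) = pvLoopB' d none ts := by
  cases ts with
  | nil => rfl
  | cons t ts =>
      simp only [pvPass1A', pvLoopB']
      by_cases h2 : (pvSplit t "=").length = 2
      · rw [if_pos h2]
        simp only [if_pos h2]
        have h := pvCore ts [] d t
        rw [List.nil_append] at h
        simpa [pvPass2A] using h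
      · rw [if_neg h2]
        simp only [if_neg h2]
        rfl

theorem pvBlock_eq (g : PySem.Dict String (PySem.Dict String String)) (b : String) :
    pvBlockA g b = pvBlockB g b := by
  simp only [pvBlockA, pvBlockB]
  rw [pvPass1A_clean, pvLoopB_clean, ← pvTop, Option.bind_assoc]

theorem pvRun_eq (bs : List String) :
    ∀ g, pvRunA g bs = pvRunB g bs := by
  induction bs with
  | nil => intro g; rfl
  | cons b bs ih =>
      intro g
      simp only [pvRunA, pvRunB, pvBlock_eq]
      exact Option.bind_congr (fun g' _ => ih g')

-- ===== VERDICT (by name: the statement is the Claim_ definition above) =====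
theorem group_settings_spec : Claim_equal_group_settings := by
  intro settings_blocks _dom _pre
  unfold Spec_group_settings group_settings group_settings_alt
  rw [pvRun_eq]
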